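-- pv_equiv track=rewrite | github.com/Ashiq-am/Path-of-Python | 1.Python Basics/Python Basics Articles/Find One’s Complement of an Integer/Example 1.py | onesComplement
-- ===== SOURCE A (Python) =====
-- def onesComplement(n):
--     v = []
--
--     # convert to binary representation
--     while (n != 0):
--         v.append(n % 2)
--         n = n // 2
--
--     v.reverse()
--
--     # change 1's to 0 and 0's to 1
--     for i in range(len(v)):
--         if (v[i] == 0):
--             v[i] = 1
--         else:
--             v[i] = 0
--
--     # convert back to number representation
--     two = 1
--     for i in range(len(v) - 1, -1, -1):
--         n = n + v[i] * two
--         two = two * 2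
--
--     return n
-- ===== SOURCE B (Python) =====
-- def onesComplement(n):
--     # closed form: mask of all ones as wide as n, minus n
--     return (1 << n.bit_length()) - 1 - n
-- ===== Notes on version B (the rewrite author's own statement) =====
-- stated objective: simpler
-- what changed: Replaced the three loops (binary digit list, bit flip, base-2 reconstruction) with the closed form: the all-ones mask of n's bit width minus n.
import Mathlib
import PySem

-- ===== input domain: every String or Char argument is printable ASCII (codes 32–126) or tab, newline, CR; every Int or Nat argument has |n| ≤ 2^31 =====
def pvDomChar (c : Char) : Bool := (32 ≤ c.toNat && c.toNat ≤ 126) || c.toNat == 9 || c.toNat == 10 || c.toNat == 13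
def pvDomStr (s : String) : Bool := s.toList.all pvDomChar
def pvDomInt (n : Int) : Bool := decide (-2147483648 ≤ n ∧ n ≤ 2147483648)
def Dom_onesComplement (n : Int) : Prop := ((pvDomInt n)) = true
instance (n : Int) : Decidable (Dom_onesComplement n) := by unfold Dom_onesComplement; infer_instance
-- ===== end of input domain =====

-- B replaces A's three loops by a closed form: the all-ones mask of n's bit width minus n (simpler).
-- Pre_ excludes negative n, on which Python A's while loop never terminates.


-- ===== PORT A =====
-- Termination lemma for the while loop (cited by decreasing_by).
theorem pvHalf_lt (n : Int) (h : 0 < n) : (PySem.Int.floordiv n 2).toNat < n.toNat := by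
  have e : PySem.Int.floordiv n 2 = n / 2 := PySem.Int.floordiv_eq_ediv_of_pos (by omega)
  rw [e]; omega

-- the 'while (n != 0)' loop: builds v (appending n % 2) and returns the final n.
-- Python loops forever when n < 0; the port's guard '0 < n' coincides with 'n ≠ 0' on Pre_ (0 ≤ n).
def pvLoop1 (n : Int) (v : List Int) : List Int × Int :=
  if h : 0 < n then pvLoop1 (PySem.Int.floordiv n 2) (v ++ [PySem.Int.mod n 2]) else (v, n)
termination_by n.toNat
decreasing_by exact pvHalf_lt n h

def onesComplement (n : Int) : Int :=
  let p := pvLoop1 n []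
  let v := p.1.reverse                                   -- v.reverse()
  let v := v.map (fun b => if b == 0 then (1 : Int) else 0)  -- flip 1s and 0s in place
  -- for i in range(len(v)-1, -1, -1): n += v[i]*two; two *= 2  — iterates v back to front
  let r := v.reverse.foldl (fun (st : Int × Int) b => (st.1 + b * st.2, st.2 * 2)) (p.2, 1)
  r.1

-- ===== PORT B =====
def onesComplement_alt (n : Int) : Int :=
  ((1 : Int) <<< PySem.Int.bitLength n) - 1 - n

-- ===== PRECONDITION & SPEC =====
-- Pre_ excludes negative n: there Python A's while loop diverges (never returns).
def Pre_onesComplement (n : Int) : Prop := 0 ≤ n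
instance (n : Int) : Decidable (Pre_onesComplement n) := by unfold Pre_onesComplement; infer_instance
def pvWitness_onesComplement : Int := 5

def Spec_onesComplement (n : Int) (out : Int) : Prop := out = onesComplement_alt n
instance (n : Int) (out : Int) : Decidable (Spec_onesComplement n out) := by unfold Spec_onesComplement; infer_instance

-- ===== CLAIM (what is proved, stated in full; the proofs are below) =====
def Claim_equal_onesComplement : Prop := ∀ (n : Int), Dom_onesComplement n → Pre_onesComplement n → Spec_onesComplement n (onesComplement n)

-- ===== LEMMAS AND PROOFS =====

-- bits of n, least-significant first (proof-side characterisation of pvLoop1)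
def pvBitsL (n : Int) : List Int :=
  if h : 0 < n then PySem.Int.mod n 2 :: pvBitsL (PySem.Int.floordiv n 2) else []
termination_by n.toNat
decreasing_by exact pvHalf_lt n h

theorem pvLoop1_eq (n : Int) (hn : 0 ≤ n) : ∀ v, pvLoop1 n v = (v ++ pvBitsL n, 0) := by
  induction n using pvBitsL.induct with
  | case1 n h ih =>
      intro v
      rw [pvLoop1, pvBitsL]; simp only [dif_pos h]
      have h2 : (0 : Int) ≤ PySem.Int.floordiv n 2 := by
        rw [PySem.Int.floordiv_eq_ediv_of_pos (by omega)]; omega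
      rw [ih h2]
      simp
  | case2 n h =>
      intro v
      rw [pvLoop1, pvBitsL]; simp only [dif_neg h]
      simp
      omega

-- value of the back-to-front reconstruction fold
theorem pvFold_eq (l : List Int) : ∀ acc two : Int,
    (l.foldl (fun (st : Int × Int) b => (st.1 + b * st.2, st.2 * 2)) (acc, two)).1
      = acc + two * (l.foldr (fun b s => b + 2 * s) 0) := by
  induction l with
  | nil => intro acc two; simp
  | cons b t ih => intro acc two; simp [List.foldl, List.foldr, ih]; ring

-- flipped bit value: Σ (1 - bit_i) 2^i = 2^bitLength - 1 - n
theorem pvFlipVal (n : Int) (hn : 0 ≤ n) :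
    ((pvBitsL n).map (fun b => if b == 0 then (1 : Int) else 0)).foldr (fun b s => b + 2 * s) 0
      = 2 ^ PySem.Int.bitLength n - 1 - n := by
  induction n using pvBitsL.induct with
  | case1 n h ih =>
      have hd : PySem.Int.floordiv n 2 = n / 2 := PySem.Int.floordiv_eq_ediv_of_pos (by omega)
      have hm : PySem.Int.mod n 2 = n % 2 := PySem.Int.mod_eq_emod_of_pos (by omega)
      have h2 : (0 : Int) ≤ PySem.Int.floordiv n 2 := by rw [hd]; omega
      rw [pvBitsL]; simp only [dif_pos h, List.map, List.foldr]
      rw [ih h2, PySem.Int.bitLength_of_pos h]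
      have hmod : n % 2 = 0 ∨ n % 2 = 1 := Int.emod_two_eq_zero_or_one n
      have hdm : 2 * (n / 2) + n % 2 = n := Int.mul_ediv_add_emod n 2
      rw [hd, hm]
      rcases hmod with h0 | h1
      · simp [h0, pow_succ]; omega
      · norm_num [h1, pow_succ]; omega
  | case2 n h =>
      have : n = 0 := by omega
      subst this
      rw [pvBitsL]; simp [PySem.Int.bitLength_zero]

theorem pvShift_eq (k : Nat) : ((1 : Int) <<< k) = 2 ^ k := by
  simp [Int.shiftLeft_eq]

-- ===== VERDICT (by name: the statement is the Claim_ definition above) =====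
theorem onesComplement_spec : Claim_equal_onesComplement := by
  intro n _ hpre
  unfold Spec_onesComplement onesComplement onesComplement_alt
  rw [pvLoop1_eq n hpre []]
  simp only [List.nil_append, List.map_reverse, List.reverse_reverse]
  rw [pvFold_eq, pvFlipVal n hpre, pvShift_eq]
  ring
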